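-- pv_equiv track=rewrite | github.com/TheMaster1127/HTHasm | HTHasm.py | InStr
-- ===== SOURCE A (Python) =====
-- def InStr(Haystack, Needle, CaseSensitive=True, StartingPos=1, Occurrence=1):
--     if Haystack is None or Needle is None:
--         return False
--     StartingPos = max(StartingPos, 1)
--     if not CaseSensitive:
--         Haystack = Haystack.lower()
--         Needle = Needle.lower()
--     count = 0
--     for i in range(StartingPos - 1, len(Haystack)):
--         if Haystack[i:i + len(Needle)] == Needle:
--             count += 1
--             if count == Occurrence:
--                 return True
--     return False
-- ===== SOURCE B (Python) =====
-- def InStr(Haystack, Needle, CaseSensitive=True, StartingPos=1, Occurrence=1):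
--     if Haystack is None or Needle is None:
--         return False
--     if not CaseSensitive:
--         Haystack = Haystack.lower()
--         Needle = Needle.lower()
--     pos = max(StartingPos, 1) - 1
--     found = 0
--     while pos < len(Haystack) and found < Occurrence:
--         j = Haystack.find(Needle, pos)
--         if j == -1:
--             break
--         found += 1
--         pos = j + 1
--     return found == Occurrence and Occurrence >= 1
-- ===== Notes on version B (the rewrite author's own statement) =====
-- stated objective: faster
-- what changed: A slices Haystack[i:i+len(Needle)] and compares at every index from StartingPos-1; B jumps directly from match to match with C-level str.find, counting occurrences until the k-th is found or the search fails.
import Mathlib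
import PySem

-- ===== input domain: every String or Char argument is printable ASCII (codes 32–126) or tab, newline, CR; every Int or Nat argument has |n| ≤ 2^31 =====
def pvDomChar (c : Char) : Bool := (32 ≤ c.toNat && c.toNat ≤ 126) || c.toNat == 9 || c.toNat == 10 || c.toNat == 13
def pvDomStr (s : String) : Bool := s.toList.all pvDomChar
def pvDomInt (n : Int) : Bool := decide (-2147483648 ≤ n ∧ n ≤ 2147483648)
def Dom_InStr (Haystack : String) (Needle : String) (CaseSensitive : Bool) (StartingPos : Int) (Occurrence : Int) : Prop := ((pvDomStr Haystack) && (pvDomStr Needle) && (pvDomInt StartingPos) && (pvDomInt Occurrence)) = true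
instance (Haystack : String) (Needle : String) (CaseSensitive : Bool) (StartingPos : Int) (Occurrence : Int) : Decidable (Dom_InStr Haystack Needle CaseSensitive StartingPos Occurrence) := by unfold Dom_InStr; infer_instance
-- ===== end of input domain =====

-- B replaces A's slice-and-compare scan of every index by a loop that jumps with str.find
-- from match to match (objective: faster, constant-factor — C-level search, no per-index slicing).

-- ===== PORT A =====
-- the 'for i in range(StartingPos-1, len(Haystack))' loop with 'count' and its early return
def loopAHelperA (h n : List Char) (occ : Int) : List Int → Int → Bool
  | [], _ => false
  | i :: rest, count =>
    if PySem.List.slice h (some i) (some (i + (n.length : Int))) = n then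
      if count + 1 = occ then true else loopAHelperA h n occ rest (count + 1)
    else loopAHelperA h n occ rest count

def InStr (Haystack : String) (Needle : String) (CaseSensitive : Bool) (StartingPos : Int) (Occurrence : Int) : Bool :=
  let sp := max StartingPos 1
  let H := if CaseSensitive then Haystack.toList else PySem.Chars.lower Haystack.toList
  let N := if CaseSensitive then Needle.toList else PySem.Chars.lower Needle.toList
  loopAHelperA H N Occurrence (PySem.List.pyRange (sp - 1) (H.length : Int) 1) 0

-- ===== PORT B =====
-- the 'while pos < len(Haystack) and found < Occurrence' loop stepping with Haystack.find(Needle, pos)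
def loopBHelperB (h n : List Char) (occ : Int) (pos : Nat) (found : Int) : Bool :=
  if hc : pos < h.length ∧ found < occ then
    let j := PySem.Chars.findFrom h n (pos : Int)
    if hj : j = -1 then
      decide (found = occ) && decide (1 ≤ occ)
    else
      loopBHelperB h n occ (j.toNat + 1) (found + 1)
  else
    decide (found = occ) && decide (1 ≤ occ)
termination_by h.length - pos
decreasing_by
  have hs := PySem.Chars.findFrom_natCast_spec h n pos (Nat.le_of_lt hc.1) hj
  have : pos ≤ (PySem.Chars.findFrom h n (pos : Int)).toNat := by
    have := hs.1; omega
  omega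

def InStr_alt (Haystack : String) (Needle : String) (CaseSensitive : Bool) (StartingPos : Int) (Occurrence : Int) : Bool :=
  let H := if CaseSensitive then Haystack.toList else PySem.Chars.lower Haystack.toList
  let N := if CaseSensitive then Needle.toList else PySem.Chars.lower Needle.toList
  loopBHelperB H N Occurrence (max StartingPos 1 - 1).toNat 0

-- ===== PRECONDITION & SPEC =====
def Spec_InStr (Haystack : String) (Needle : String) (CaseSensitive : Bool) (StartingPos : Int) (Occurrence : Int) (out : Bool) : Prop := out = InStr_alt Haystack Needle CaseSensitive StartingPos Occurrence
instance (Haystack : String) (Needle : String) (CaseSensitive : Bool) (StartingPos : Int) (Occurrence : Int) (out : Bool) : Decidable (Spec_InStr Haystack Needle CaseSensitive StartingPos Occurrence out) := by unfold Spec_InStr; infer_instance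

-- ===== CLAIM (what is proved, stated in full; the proofs are below) =====
def Claim_equal_InStr : Prop := ∀ (Haystack : String) (Needle : String) (CaseSensitive : Bool) (StartingPos : Int) (Occurrence : Int), Dom_InStr Haystack Needle CaseSensitive StartingPos Occurrence → Spec_InStr Haystack Needle CaseSensitive StartingPos Occurrence (InStr Haystack Needle CaseSensitive StartingPos Occurrence)

-- ===== LEMMAS AND PROOFS =====

-- number of indices i ∈ [pos, h.length) at which n occurs in h
def mcnt (h n : List Char) (pos : Nat) : Nat :=
  (List.range' pos (h.length - pos)).countP (fun i => decide (n <+: h.drop i))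

lemma mcnt_eq_zero {h n : List Char} {pos : Nat} (hni : ¬ n <:+: h.drop pos) :
    mcnt h n pos = 0 := by
  unfold mcnt
  rw [List.countP_eq_zero]
  intro i hi
  simp only [decide_eq_true_eq]
  intro hp
  apply hni
  have hpi : pos ≤ i := (List.mem_range'_1.mp hi).1
  have : h.drop i = (h.drop pos).drop (i - pos) := by
    rw [List.drop_drop]; congr 1; omega
  exact (this ▸ hp).isInfix.trans (List.drop_suffix (i - pos) (h.drop pos)).isInfix

lemma mcnt_split {h n : List Char} {pos j : Nat} (hpj : pos ≤ j) (hjl : j < h.length)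
    (hmin : ∀ i, pos ≤ i → i < j → ¬ n <+: h.drop i) (hj : n <+: h.drop j) :
    mcnt h n pos = 1 + mcnt h n (j + 1) := by
  unfold mcnt
  have h1 : List.range' pos (h.length - pos) =
      List.range' pos (j - pos) ++ List.range' j (h.length - j) := by
    have := List.range'_append (s := pos) (m := j - pos) (n := h.length - j) (step := 1)
    rw [show pos + 1 * (j - pos) = j by omega] at this
    rw [show h.length - pos = (j - pos) + (h.length - j) by omega]
    exact this.symm
  have h2 : List.range' j (h.length - j) = j :: List.range' (j + 1) (h.length - (j + 1)) := by
    rw [show h.length - j = (h.length - (j+1)) + 1 by omega, List.range'_succ]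
  rw [h1, h2, List.countP_append, List.countP_cons]
  have hz : (List.range' pos (j - pos)).countP (fun i => decide (n <+: h.drop i)) = 0 := by
    rw [List.countP_eq_zero]
    intro i hi
    simp only [decide_eq_true_eq]
    have := List.mem_range'_1.mp hi
    exact hmin i this.1 (by omega)
  simp [hz, hj]
  omega

-- A's loop over range(s, len) returns True iff occ lands within count + matches-from-s
lemma loopA_nil (h n : List Char) (occ : Int) (s : Nat) (count : Int) (hs : h.length ≤ s) :
    (loopAHelperA h n occ (PySem.List.pyRange (s : Int) (h.length : Int) 1) count = true) ↔
      (count < occ ∧ occ ≤ count + (mcnt h n s : Int)) := by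
  rw [PySem.List.pyRange_one_eq_nil (by exact_mod_cast hs)]
  unfold loopAHelperA
  have : mcnt h n s = 0 := by unfold mcnt; rw [show h.length - s = 0 by omega]; rfl
  rw [this]
  simp only [Bool.false_eq_true, false_iff]
  omega

lemma loopA_iff (h n : List Char) (occ : Int) (s : Nat) (count : Int) :
    (loopAHelperA h n occ (PySem.List.pyRange (s : Int) (h.length : Int) 1) count = true) ↔
      (count < occ ∧ occ ≤ count + (mcnt h n s : Int)) := by
  have main : ∀ (k s : Nat) (count : Int), h.length - s ≤ k →
      ((loopAHelperA h n occ (PySem.List.pyRange (s : Int) (h.length : Int) 1) count = true) ↔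
        (count < occ ∧ occ ≤ count + (mcnt h n s : Int))) := by
    intro k
    induction k with
    | zero => intro s count hk; exact loopA_nil h n occ s count (by omega)
    | succ k ih =>
      intro s count hk
      by_cases hs : s < h.length
      · rw [PySem.List.pyRange_one_cons (by exact_mod_cast hs)]
        unfold loopAHelperA
        have htest : (PySem.List.slice h (some (s : Int)) (some ((s : Int) + (n.length : Int))) = n)
            ↔ n <+: h.drop s := by
          rw [PySem.List.slice_natCast_add h s n.length]
          constructor
          · intro he; exact List.prefix_iff_eq_take.mpr he.symm
          · intro hp; exact (List.prefix_iff_eq_take.mp hp).symm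
        have hrec : ((s : Int) + 1) = ((s + 1 : Nat) : Int) := by push_cast; ring
        have hmc : mcnt h n s = (if n <+: h.drop s then 1 else 0) + mcnt h n (s + 1) := by
          unfold mcnt
          rw [show h.length - s = (h.length - (s+1)) + 1 by omega, List.range'_succ,
            List.countP_cons]
          by_cases hp : n <+: h.drop s <;> simp [hp] <;> omega
        by_cases hp : n <+: h.drop s
        · rw [if_pos (htest.mpr hp)]
          by_cases he : count + 1 = occ
          · rw [if_pos he]
            rw [hmc]
            simp [hp]
            omega
          · rw [if_neg he, hrec, ih (s + 1) (count + 1) (by omega)]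
            rw [hmc]; simp [hp]; omega
        · rw [if_neg (htest.not.mpr hp), hrec, ih (s + 1) count (by omega)]
          rw [hmc]; simp [hp]
      · exact loopA_nil h n occ s count (by omega)
  exact main (h.length - s) s count (le_refl _)

-- loopA over range(a, len) for any nonnegative Int start a
lemma loopA_iff' (h n : List Char) (occ : Int) (a : Int) (count : Int) (ha : 0 ≤ a) :
    (loopAHelperA h n occ (PySem.List.pyRange a (h.length : Int) 1) count = true) ↔
      (count < occ ∧ occ ≤ count + (mcnt h n a.toNat : Int)) := by
  have h0 := loopA_iff h n occ a.toNat count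
  rwa [Int.toNat_of_nonneg ha] at h0

-- B's loop returns True iff occ lands within found + matches-from-pos
lemma loopB_iff (h n : List Char) (occ : Int) (pos : Nat) (found : Int) :
    (loopBHelperB h n occ pos found = true) ↔
      (1 ≤ occ ∧ found ≤ occ ∧ occ ≤ found + (mcnt h n pos : Int)) := by
  refine loopBHelperB.induct h n occ
    (motive := fun pos found => ((loopBHelperB h n occ pos found = true) ↔
      (1 ≤ occ ∧ found ≤ occ ∧ occ ≤ found + (mcnt h n pos : Int)))) ?_ ?_ ?_ pos found
  · intro pos found hc j hj0
    have hj : PySem.Chars.findFrom h n (pos : Int) = -1 := hj0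
    show loopBHelperB h n occ pos found = true ↔ _
    rw [loopBHelperB.eq_def, dif_pos hc]
    dsimp only
    rw [dif_pos hj]
    have hle : pos ≤ h.length := Nat.le_of_lt hc.1
    have hni : ¬ n <:+: h.drop pos :=
      (PySem.Chars.findFrom_natCast_eq_neg_one_iff h n pos hle).mp hj
    rw [mcnt_eq_zero hni]
    simp
    omega
  · intro pos found hc j hj0 ih0
    have hj : ¬ PySem.Chars.findFrom h n (pos : Int) = -1 := hj0
    have ih : loopBHelperB h n occ ((PySem.Chars.findFrom h n (pos : Int)).toNat + 1) (found + 1) = true ↔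
        (1 ≤ occ ∧ found + 1 ≤ occ ∧ occ ≤ (found + 1) + (mcnt h n ((PySem.Chars.findFrom h n (pos : Int)).toNat + 1) : Int)) := ih0
    show loopBHelperB h n occ pos found = true ↔ _
    rw [loopBHelperB.eq_def, dif_pos hc]
    dsimp only
    rw [dif_neg hj]
    have hle : pos ≤ h.length := Nat.le_of_lt hc.1
    have hs := PySem.Chars.findFrom_natCast_spec h n pos hle hj
    have hpj : pos ≤ (PySem.Chars.findFrom h n (pos : Int)).toNat := by have := hs.1; omega
    have hpre : n <+: h.drop (PySem.Chars.findFrom h n (pos : Int)).toNat := hs.2.1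
    have hjl : (PySem.Chars.findFrom h n (pos : Int)).toNat < h.length := by
      by_contra hge
      have hdrop : h.drop (PySem.Chars.findFrom h n (pos : Int)).toNat = [] :=
        List.drop_eq_nil_of_le (by omega)
      have hnil : n = [] := List.prefix_nil.mp (hdrop ▸ hpre)
      have : ¬ n <+: h.drop pos := hs.2.2 pos (le_refl pos) (by omega)
      exact this (hnil ▸ List.nil_prefix)
    have hsplit := mcnt_split hpj hjl (fun i h1 h2 => hs.2.2 i h1 h2) hpre
    rw [ih, hsplit]
    have := hc.2
    constructor <;> intro hh <;> push_cast at * <;> omega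
  · intro pos found hc
    show loopBHelperB h n occ pos found = true ↔ _
    rw [loopBHelperB.eq_def, dif_neg hc]
    by_cases hp : pos < h.length
    · have hfo : ¬ found < occ := fun hlt => hc ⟨hp, hlt⟩
      simp
      omega
    · have : mcnt h n pos = 0 := by unfold mcnt; rw [show h.length - pos = 0 by omega]; rfl
      rw [this]
      simp
      omega

lemma InStr_eq_alt (Haystack Needle : String) (CaseSensitive : Bool) (StartingPos Occurrence : Int) :
    InStr Haystack Needle CaseSensitive StartingPos Occurrence =
      InStr_alt Haystack Needle CaseSensitive StartingPos Occurrence := by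
  unfold InStr InStr_alt
  dsimp only
  rw [Bool.eq_iff_iff]
  rw [loopA_iff' _ _ Occurrence (max StartingPos 1 - 1) 0 (by omega),
    loopB_iff _ _ Occurrence (max StartingPos 1 - 1).toNat 0]
  omega

-- ===== VERDICT (by name: the statement is the Claim_ definition above) =====
theorem InStr_spec : Claim_equal_InStr := by
  intro Haystack Needle CaseSensitive StartingPos Occurrence _
  exact InStr_eq_alt Haystack Needle CaseSensitive StartingPos Occurrence
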